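-- pv_equiv track=rewrite | github.com/yatharth9/spotmovie | oauth.py | GenreListFinder
-- ===== SOURCE A (Python) =====
-- def GenreListFinder(MainGenreList):
--     MusicGenreList = ['EDM', 'ROCK', 'JAZZ', 'DUBSTEP', 'R&B', 'TECHNO', 'COUNTRY', 'ELECTRO', 'INDIE', 'POP', 'CLASSICAL', 'HIP-HOP', 'K-POP', 'METAL', 'RAP', 'REGGAE', 'FOLK']
--
--     TempList = []
--     MajorGenreList = []
--
--     for i in MainGenreList:
--         for j in i:
--             temp = j.split()
--             for t in temp:
--                 TempList.append(t.upper())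
--
--     TempList = list(dict.fromkeys(TempList))
--
--     if "HIP" in TempList:
--         if "HOP" in TempList:
--             TempList.append("HIP-HOP")
--             TempList.remove("HIP")
--             TempList.remove("HOP")
--
--     for i in TempList:
--         if i in MusicGenreList:
--             MajorGenreList.append(i)
--
--     return MajorGenreList
-- ===== SOURCE B (Python) =====
-- def GenreListFinder(MainGenreList):
--     # Single pass: dedup, HIP/HOP detection and genre filtering merged into one loop.
--     genres = {'EDM', 'ROCK', 'JAZZ', 'DUBSTEP', 'R&B', 'TECHNO', 'COUNTRY', 'ELECTRO',
--               'INDIE', 'POP', 'CLASSICAL', 'HIP-HOP', 'K-POP', 'METAL', 'RAP', 'REGGAE', 'FOLK'}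
--     seen = set()
--     out = []
--     hip = hop = False
--     for i in MainGenreList:
--         for j in i:
--             for t in j.split():
--                 u = t.upper()
--                 if u == 'HIP':
--                     hip = True
--                 elif u == 'HOP':
--                     hop = True
--                 if u not in seen:
--                     seen.add(u)
--                     if u in genres:
--                         out.append(u)
--     if hip and hop:
--         out.append('HIP-HOP')
--     return out
-- ===== Notes on version B (the rewrite author's own statement) =====
-- stated objective: alternative
-- what changed: Replaces A's four sequential passes (collect all uppercased tokens, dedup via dict.fromkeys, HIP/HOP splice, filter against the genre list) with a single pass over the tokens that maintains a seen-set, the filtered output list and two HIP/HOP flags, appending HIP-HOP once at the end.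
import Mathlib
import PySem

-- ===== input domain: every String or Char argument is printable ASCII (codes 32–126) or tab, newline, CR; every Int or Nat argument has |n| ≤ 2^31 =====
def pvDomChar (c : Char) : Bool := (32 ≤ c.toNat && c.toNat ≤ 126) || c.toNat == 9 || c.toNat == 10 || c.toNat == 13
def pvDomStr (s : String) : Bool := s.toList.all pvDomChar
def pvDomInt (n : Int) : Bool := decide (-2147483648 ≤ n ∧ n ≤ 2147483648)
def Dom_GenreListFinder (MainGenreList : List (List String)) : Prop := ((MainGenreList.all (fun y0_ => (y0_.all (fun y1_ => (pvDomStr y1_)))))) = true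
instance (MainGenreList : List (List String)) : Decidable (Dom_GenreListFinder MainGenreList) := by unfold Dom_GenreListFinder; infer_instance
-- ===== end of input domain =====

-- B merges A's four passes (collect, dedup, HIP/HOP fixup, genre filter) into a single pass
-- with a seen-set and two flags (objective: simpler/alternative, same asymptotic cost).

-- ===== PORT A =====
def pvMusicGenres : List String :=
  ["EDM", "ROCK", "JAZZ", "DUBSTEP", "R&B", "TECHNO", "COUNTRY", "ELECTRO", "INDIE",
   "POP", "CLASSICAL", "HIP-HOP", "K-POP", "METAL", "RAP", "REGGAE", "FOLK"]

def GenreListFinder (MainGenreList : List (List String)) : List String :=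
  let tempList : List String := MainGenreList.foldl (fun acc i =>
    i.foldl (fun acc j =>
      (PySem.Str.split₀ j).foldl (fun acc t => acc ++ [PySem.Str.upper t]) acc) acc) []
  let tempList := PySem.List.dedup tempList          -- list(dict.fromkeys(TempList))
  let tempList :=
    if "HIP" ∈ tempList then
      if "HOP" ∈ tempList then
        -- list.remove: both "HIP" and "HOP" are members here (the guards), so
        -- remove? = some (·.erase _) (PySem.List.remove?_eq_some_erase) — erase is exact.
        (((tempList ++ ["HIP-HOP"]).erase "HIP").erase "HOP")
      else tempList
    else tempList
  tempList.foldl (fun acc i => if i ∈ pvMusicGenres then acc ++ [i] else acc) []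

-- ===== PORT B =====
def pvGenreSet : PySem.Set String :=
  PySem.Set.ofList ["EDM", "ROCK", "JAZZ", "DUBSTEP", "R&B", "TECHNO", "COUNTRY", "ELECTRO",
                    "INDIE", "POP", "CLASSICAL", "HIP-HOP", "K-POP", "METAL", "RAP", "REGGAE", "FOLK"]

structure PvBState where
  seen : PySem.Set String
  out  : List String
  hip  : Bool
  hop  : Bool

def pvStep (st : PvBState) (t : String) : PvBState :=
  let u := PySem.Str.upper t
  let st := if u = "HIP" then { st with hip := true }
            else if u = "HOP" then { st with hop := true }
            else st
  if PySem.Set.contains st.seen u then st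
  else { st with seen := PySem.Set.add st.seen u,
                 out := if PySem.Set.contains pvGenreSet u then st.out ++ [u] else st.out }

def GenreListFinder_alt (MainGenreList : List (List String)) : List String :=
  let st : PvBState := MainGenreList.foldl (fun st i =>
    i.foldl (fun st j => (PySem.Str.split₀ j).foldl pvStep st) st)
    ⟨PySem.Set.empty, [], false, false⟩
  if st.hip && st.hop then st.out ++ ["HIP-HOP"] else st.out

-- ===== PRECONDITION & SPEC =====
def Spec_GenreListFinder (MainGenreList : List (List String)) (out : List String) : Prop := out = GenreListFinder_alt MainGenreList
instance (MainGenreList : List (List String)) (out : List String) : Decidable (Spec_GenreListFinder MainGenreList out) := by unfold Spec_GenreListFinder; infer_instance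

-- ===== CLAIM (what is proved, stated in full; the proofs are below) =====
def Claim_equal_GenreListFinder : Prop := ∀ (MainGenreList : List (List String)), Dom_GenreListFinder MainGenreList → Spec_GenreListFinder MainGenreList (GenreListFinder MainGenreList)

-- ===== LEMMAS AND PROOFS =====

-- pvStep only looks at the uppercased token
def pvStepU (st : PvBState) (u : String) : PvBState :=
  let st := if u = "HIP" then { st with hip := true }
            else if u = "HOP" then { st with hop := true }
            else st
  if PySem.Set.contains st.seen u then st
  else { st with seen := PySem.Set.add st.seen u,
                 out := if PySem.Set.contains pvGenreSet u then st.out ++ [u] else st.out }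

theorem pvStep_eq : pvStep = fun st t => pvStepU st (PySem.Str.upper t) := rfl

-- flatten one level of nested foldl
theorem pv_foldl_flat {α β : Type} (g : α → List β) {σ : Type} (f : σ → β → σ)
    (l : List α) (s : σ) :
    l.foldl (fun s x => (g x).foldl f s) s = (l.flatMap g).foldl f s := by
  induction l generalizing s with
  | nil => rfl
  | cons x xs ih => simp [List.flatMap_cons, List.foldl_append, ih]

-- the filter of an erased-out element survives when the element fails the predicate
theorem pv_filter_erase (l : List String) (a : String) (p : String → Bool) (h : p a = false) :
    (l.erase a).filter p = l.filter p := by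
  induction l with
  | nil => rfl
  | cons x xs ih =>
    by_cases hx : x = a
    · subst hx; simp [h]
    · have : (x == a) = false := by simp [hx]
      simp [this, List.filter_cons]
      cases hp : p x <;> simp [ih]

def pvInv (p : List String) (st : PvBState) : Prop :=
  st.seen = PySem.List.dedup p ∧
  st.out = (PySem.List.dedup p).filter (fun u => PySem.Set.contains pvGenreSet u) ∧
  st.hip = decide ("HIP" ∈ p) ∧
  st.hop = decide ("HOP" ∈ p)

theorem pv_dedup_append (p : List String) (u : String) :
    PySem.List.dedup (p ++ [u]) =
      if u ∈ p then PySem.List.dedup p else PySem.List.dedup p ++ [u] := by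
  simp only [PySem.List.dedup_eq_ofList, PySem.Set.ofList_eq_foldl, List.foldl_append,
    List.foldl_cons, List.foldl_nil]
  have hmem : u ∈ List.foldl PySem.Set.add [] p ↔ u ∈ p := by
    rw [← PySem.Set.ofList_eq_foldl, ← PySem.List.dedup_eq_ofList]
    exact PySem.List.mem_dedup p u
  simp [PySem.Set.add, hmem]

theorem pv_inv_step (p : List String) (st : PvBState) (u : String) (h : pvInv p st) :
    pvInv (p ++ [u]) (pvStepU st u) := by
  obtain ⟨hs, ho, hhip, hhop⟩ := h
  have hseen : PySem.Set.contains st.seen u = decide (u ∈ p) := by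
    rw [hs, PySem.Set.contains_eq_decide]
    simp
  refine ⟨?_, ?_, ?_, ?_⟩ <;>
    simp only [pvStepU, hs, ho, hhip, hhop, pv_dedup_append] <;>
    by_cases hu : u ∈ p <;>
    by_cases h1 : u = "HIP" <;>
    by_cases h2 : u = "HOP" <;>
    simp_all [PySem.Set.add, List.filter_append, List.filter_cons] <;>
    (try (split_ifs <;> simp)) <;>
    (try (exact fun h => h1 h.symm)) <;> (try (exact fun h => h2 h.symm))

theorem pv_inv_foldl (ts : List String) (p : List String) (st : PvBState) (h : pvInv p st) :
    pvInv (p ++ ts) (ts.foldl pvStepU st) := by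
  induction ts generalizing p st with
  | nil => simpa using h
  | cons t ts ih =>
    have := ih (p ++ [t]) (pvStepU st t) (pv_inv_step p st t h)
    simpa using this

theorem pv_genre_pred (u : String) :
    PySem.Set.contains pvGenreSet u = decide (u ∈ pvMusicGenres) := by
  rw [PySem.Set.contains_eq_decide]
  have : pvGenreSet = pvMusicGenres := by decide
  rw [this]

-- ===== VERDICT (by name: the statement is the Claim_ definition above) =====
theorem GenreListFinder_spec : Claim_equal_GenreListFinder := by
  intro M _
  unfold Spec_GenreListFinder GenreListFinder GenreListFinder_alt
  -- flatten A's collection loop into a flatMap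
  simp only [PySem.List.foldl_append_singleton_eq_map, PySem.List.foldl_append_eq_flatMap,
    List.nil_append]
  -- flatten B's loop into a single foldl over the uppercased token list
  have hB : (M.foldl (fun st i => i.foldl (fun st j => (PySem.Str.split₀ j).foldl pvStep st) st)
      (⟨PySem.Set.empty, [], false, false⟩ : PvBState)) =
      (M.flatMap (fun i => i.flatMap (fun j => (PySem.Str.split₀ j).map PySem.Str.upper))).foldl
        pvStepU ⟨PySem.Set.empty, [], false, false⟩ := by
    have h1 : ∀ (i : List String) (st : PvBState),
        i.foldl (fun st j => (PySem.Str.split₀ j).foldl pvStep st) st =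
        (i.flatMap (fun j => PySem.Str.split₀ j)).foldl pvStep st := by
      intro i st; exact pv_foldl_flat _ pvStep i st
    calc M.foldl (fun st i => i.foldl (fun st j => (PySem.Str.split₀ j).foldl pvStep st) st)
          (⟨PySem.Set.empty, [], false, false⟩ : PvBState)
        = (M.flatMap (fun i => i.flatMap (fun j => PySem.Str.split₀ j))).foldl pvStep
            ⟨PySem.Set.empty, [], false, false⟩ := by
          simp only [h1]; exact pv_foldl_flat _ pvStep M _
      _ = _ := by
          simp only [pvStep_eq, ← List.foldl_map, List.map_flatMap]
  rw [hB]
  set U : List String := M.flatMap (fun i => i.flatMap (fun j => (PySem.Str.split₀ j).map PySem.Str.upper)) with hU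
  have hinv : pvInv U (U.foldl pvStepU ⟨PySem.Set.empty, [], false, false⟩) := by
    have := pv_inv_foldl U [] ⟨PySem.Set.empty, [], false, false⟩
      ⟨rfl, rfl, by simp, by simp⟩
    simpa using this
  obtain ⟨hs, ho, hhip, hhop⟩ := hinv
  set st := U.foldl pvStepU (⟨PySem.Set.empty, [], false, false⟩ : PvBState)
  set L := PySem.List.dedup U with hL
  -- A's final filter loop is a List.filter
  simp only [PySem.List.foldl_append_ite_eq_filter, List.nil_append]
  have hfilter : ∀ l : List String,
      l.filter (fun x => decide (x ∈ pvMusicGenres)) =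
      l.filter (fun u => PySem.Set.contains pvGenreSet u) := by
    intro l; apply List.filter_congr; intro x _; rw [pv_genre_pred]
  by_cases hhipL : "HIP" ∈ L <;> by_cases hhopL : "HOP" ∈ L
  · -- both present: A filters the erased-and-appended list
    have hhipU : "HIP" ∈ U := (PySem.List.mem_dedup U _).mp hhipL
    have hhopU : "HOP" ∈ U := (PySem.List.mem_dedup U _).mp hhopL
    simp only [hhipL, hhopL, if_pos]
    rw [hfilter, pv_filter_erase _ _ _ (by decide), pv_filter_erase _ _ _ (by decide),
      List.filter_append]
    rw [hhip, hhop]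
    simp [hhipU, hhopU, ho, hL, (by decide : "HIP-HOP" ∈ pvGenreSet)]
  · have hhopU : "HOP" ∉ U := fun h => hhopL ((PySem.List.mem_dedup U _).mpr h)
    simp [hhipL, hhopL, hfilter, ho, hhip, hhop, hhopU]
  · have hhipU : "HIP" ∉ U := fun h => hhipL ((PySem.List.mem_dedup U _).mpr h)
    simp [hhipL, hfilter, ho, hhip, hhipU]
  · have hhipU : "HIP" ∉ U := fun h => hhipL ((PySem.List.mem_dedup U _).mpr h)
    simp [hhipL, hfilter, ho, hhip, hhipU]
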